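-- pv_equiv track=rewrite | github.com/groupsum/ssot-registry | src/ssot_registry/guards/profile_requirements.py | evaluate_required_profile_failures
-- ===== SOURCE A (Python) =====
-- from typing import Any
--
-- def resolve_profile_ids_transitively(
--     profile_id: str,
--     index: dict[str, dict[str, dict[str, Any]]],
-- ) -> tuple[list[str], list[str]]:
--     ordered: list[str] = []
--     failures: list[str] = []
--     visiting: list[str] = []
--     visited: set[str] = set()
--
--     def visit(current_profile_id: str) -> None:
--         profile = index["profiles"].get(current_profile_id)
--         if profile is None:
--             failures.append(f"Missing profile {current_profile_id}")
--             return
--         if current_profile_id in visiting: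
--             cycle = " -> ".join(visiting + [current_profile_id])
--             failures.append(f"Profile requirement cycle detected: {cycle}")
--             return
--         if current_profile_id in visited:
--             return
--         visiting.append(current_profile_id)
--         for nested_profile_id in profile.get("profile_ids", []):
--             visit(nested_profile_id)
--             if nested_profile_id in index["profiles"] and nested_profile_id not in ordered:
--                 ordered.append(nested_profile_id)
--         visiting.pop()
--         visited.add(current_profile_id)
--
--     visit(profile_id)
--     return ordered, sorted(set(failures))
--
-- def evaluate_required_profile_failures(
--     profile_id: str,
--     index: dict[str, dict[str, dict[str, Any]]],
-- ) -> list[str]: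
--     profile = index["profiles"].get(profile_id)
--     if profile is None:
--         return [f"Missing profile {profile_id}"]
--
--     failures: list[str] = []
--     _, transitive_failures = resolve_profile_ids_transitively(profile_id, index)
--     failures.extend(transitive_failures)
--
--     for nested_profile_id in profile.get("profile_ids", []):
--         if nested_profile_id not in index["profiles"]:
--             failures.append(f"Profile {profile_id} requires missing profile {nested_profile_id}")
--
--     return sorted(set(failures))
-- ===== SOURCE B (Python) =====
-- def evaluate_required_profile_failures(profile_id, index):
--     profiles = index["profiles"]
--     if profiles.get(profile_id) is None:
--         return [f"Missing profile {profile_id}"]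
--
--     failures: list[str] = []
--     visited: set[str] = set()
--     path: list[str] = [profile_id]
--     # stack of frames: [node, remaining children to expand]
--     stack = [[profile_id, list(profiles[profile_id].get("profile_ids", []))]]
--     while stack:
--         node, rem = stack[-1]
--         if rem:
--             child = rem.pop(0)
--             if child not in profiles:
--                 failures.append(f"Missing profile {child}")
--             elif child in path:
--                 cycle = " -> ".join(path + [child])
--                 failures.append(f"Profile requirement cycle detected: {cycle}")
--             elif child in visited:
--                 pass
--             else:
--                 stack.append([child, list(profiles[child].get("profile_ids", []))])
--                 path.append(child)
--         else:
--             stack.pop()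
--             path.pop()
--             visited.add(node)
--
--     for nested in profiles[profile_id].get("profile_ids", []):
--         if nested not in profiles:
--             failures.append(f"Profile {profile_id} requires missing profile {nested}")
--
--     return sorted(set(failures))
-- ===== Notes on version B (the rewrite author's own statement) =====
-- stated objective: alternative
-- what changed: The nested recursive visit closure (with its mutable ordered/visiting lists) is replaced by an iterative DFS over an explicit stack of (node, remaining-children) frames with an explicit ancestor path list; the unused 'ordered' bookkeeping and the intermediate sorted(set(...)) pass of the helper are dropped, and all failures are collected in one list sorted once at the end.
import Mathlib
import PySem

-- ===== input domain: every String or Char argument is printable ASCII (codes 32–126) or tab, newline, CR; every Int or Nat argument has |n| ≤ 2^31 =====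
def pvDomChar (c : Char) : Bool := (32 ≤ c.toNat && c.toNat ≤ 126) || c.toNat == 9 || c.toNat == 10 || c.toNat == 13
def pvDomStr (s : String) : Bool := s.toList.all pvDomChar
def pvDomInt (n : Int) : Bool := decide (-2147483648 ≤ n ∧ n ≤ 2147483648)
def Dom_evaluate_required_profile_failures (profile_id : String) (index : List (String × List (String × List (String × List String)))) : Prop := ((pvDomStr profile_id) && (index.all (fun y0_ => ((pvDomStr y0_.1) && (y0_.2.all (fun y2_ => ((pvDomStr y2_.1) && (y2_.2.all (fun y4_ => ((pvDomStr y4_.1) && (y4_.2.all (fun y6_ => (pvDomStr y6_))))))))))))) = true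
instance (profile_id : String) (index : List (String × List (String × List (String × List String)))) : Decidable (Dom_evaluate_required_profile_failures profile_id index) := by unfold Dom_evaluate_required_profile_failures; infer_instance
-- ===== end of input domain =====

-- B replaces A's recursive visit closure by an iterative DFS over an explicit stack of
-- (node, remaining-children) frames with an explicit ancestor path, dropping the unused
-- 'ordered' list and the helper's intermediate sorted(set(...)) pass (objective: alternative).

-- shared dictionary primitives (Python dict lookup = first match in the association list)
def pvChildren (p : List (String × List String)) : List String :=
  (List.lookup "profile_ids" p).getD []          -- profile.get("profile_ids", [])

def pvSortedSet (xs : List String) : List String :=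
  PySem.List.sorted (PySem.Set.ofList xs) (fun x => x) false   -- sorted(set(xs))

-- ===== PORT A =====
-- state: (ordered, failures, visiting, visited)
def pvVisitA (profiles : List (String × List (String × List String))) :
    Nat → String → List String × List String × List String × List String →
    List String × List String × List String × List String
  | 0, _, st => st      -- fuel guard only: recursion depth ≤ number of profiles, never reached
  | f+1, cur, st =>
    match List.lookup cur profiles with
    | none => (st.1, st.2.1 ++ ["Missing profile " ++ cur], st.2.2.1, st.2.2.2)
    | some profile =>
      if st.2.2.1.contains cur then
        (st.1, st.2.1 ++ ["Profile requirement cycle detected: " ++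
            PySem.Str.join " -> " (st.2.2.1 ++ [cur])], st.2.2.1, st.2.2.2)
      else if PySem.Set.contains st.2.2.2 cur then st
      else
        let st1 := (st.1, st.2.1, st.2.2.1 ++ [cur], st.2.2.2)
        let st2 := (pvChildren profile).foldl (fun s c =>
            let s' := pvVisitA profiles f c s
            if ((List.lookup c profiles).isSome && !(s'.1.contains c))
            then (s'.1 ++ [c], s'.2) else s') st1
        (st2.1, st2.2.1, st2.2.2.1.dropLast, PySem.Set.add st2.2.2.2 cur)

def pvResolveA (profile_id : String)
    (index : List (String × List (String × List (String × List String)))) :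
    List String × List String :=
  let profiles := (List.lookup "profiles" index).getD []
  let st := pvVisitA profiles (profiles.length + 1) profile_id ([], [], [], [])
  (st.1, pvSortedSet st.2.1)

def evaluate_required_profile_failures (profile_id : String) (index : List (String × List (String × List (String × List String)))) : List String :=
  let profiles := (List.lookup "profiles" index).getD []   -- index["profiles"]; KeyError excluded by Pre_
  match List.lookup profile_id profiles with
  | none => ["Missing profile " ++ profile_id]
  | some profile =>
    let failures := [] ++ (pvResolveA profile_id index).2
    let failures := (pvChildren profile).foldl (fun acc c =>
        if (List.lookup c profiles).isNone
        then acc ++ ["Profile " ++ profile_id ++ " requires missing profile " ++ c]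
        else acc) failures
    pvSortedSet failures

-- ===== PORT B =====
def pvChildrenOf (profiles : List (String × List (String × List String))) (c : String) : List String :=
  pvChildren ((List.lookup c profiles).getD [])

-- state: (failures, path, visited); stack of frames (node, remaining children)
def pvRunB (profiles : List (String × List (String × List String))) :
    Nat → List (String × List String) → List String × List String × List String →
    List String × List String × List String
  | 0, _, st => st      -- fuel guard only: total step count is bounded, never reached
  | _+1, [], st => st
  | f+1, (node, rem) :: rest, st =>
    match rem with
    | [] => pvRunB profiles f rest (st.1, st.2.1.dropLast, PySem.Set.add st.2.2 node)
    | c :: rem' =>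
      if (List.lookup c profiles).isNone then
        pvRunB profiles f ((node, rem') :: rest)
          (st.1 ++ ["Missing profile " ++ c], st.2.1, st.2.2)
      else if st.2.1.contains c then
        pvRunB profiles f ((node, rem') :: rest)
          (st.1 ++ ["Profile requirement cycle detected: " ++
              PySem.Str.join " -> " (st.2.1 ++ [c])], st.2.1, st.2.2)
      else if PySem.Set.contains st.2.2 c then
        pvRunB profiles f ((node, rem') :: rest) st
      else
        pvRunB profiles f ((c, pvChildrenOf profiles c) :: (node, rem') :: rest)
          (st.1, st.2.1 ++ [c], st.2.2)

-- fuel for the while loop (proved sufficient below): each profile is pushed at most once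
def pvFuelB (profiles : List (String × List (String × List String))) : Nat :=
  profiles.length * ((profiles.foldl (fun a p => max a (pvChildren p.2).length) 0) + 1) +
    (profiles.foldl (fun a p => max a (pvChildren p.2).length) 0) + 2

def evaluate_required_profile_failures_alt (profile_id : String) (index : List (String × List (String × List (String × List String)))) : List String :=
  let profiles := (List.lookup "profiles" index).getD []   -- index["profiles"]; KeyError excluded by Pre_
  match List.lookup profile_id profiles with
  | none => ["Missing profile " ++ profile_id]
  | some profile =>
    let st := pvRunB profiles (pvFuelB profiles)
        [(profile_id, pvChildren profile)] ([], [profile_id], [])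
    let failures := (pvChildren profile).foldl (fun acc c =>
        if (List.lookup c profiles).isNone
        then acc ++ ["Profile " ++ profile_id ++ " requires missing profile " ++ c]
        else acc) st.1
    pvSortedSet failures

-- ===== PRECONDITION & SPEC =====
-- Pre_ excludes exactly the inputs whose index has no "profiles" key: there Python A raises KeyError.
def Pre_evaluate_required_profile_failures (profile_id : String) (index : List (String × List (String × List (String × List String)))) : Prop :=
  "profiles" ∈ index.map Prod.fst
instance (profile_id : String) (index : List (String × List (String × List (String × List String)))) : Decidable (Pre_evaluate_required_profile_failures profile_id index) := by unfold Pre_evaluate_required_profile_failures; infer_instance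

def pvWitness_evaluate_required_profile_failures : String × (List (String × List (String × List (String × List String)))) :=
  ("a", [("profiles", [("a", [("profile_ids", ["b"])]), ("b", [])])])

def Spec_evaluate_required_profile_failures (profile_id : String) (index : List (String × List (String × List (String × List String)))) (out : List String) : Prop := out = evaluate_required_profile_failures_alt profile_id index
instance (profile_id : String) (index : List (String × List (String × List (String × List String)))) (out : List String) : Decidable (Spec_evaluate_required_profile_failures profile_id index out) := by unfold Spec_evaluate_required_profile_failures; infer_instance

-- ===== CLAIM (what is proved, stated in full; the proofs are below) =====
def Claim_equal_evaluate_required_profile_failures : Prop := ∀ (profile_id : String) (index : List (String × List (String × List (String × List String)))), Dom_evaluate_required_profile_failures profile_id index → Pre_evaluate_required_profile_failures profile_id index → Spec_evaluate_required_profile_failures profile_id index (evaluate_required_profile_failures profile_id index)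

-- ===== LEMMAS AND PROOFS =====

-- the (failures, visiting, visited) projection of A's visit: 'ordered' never feeds back
def pvVisitP (profiles : List (String × List (String × List String))) :
    Nat → String → List String × List String × List String →
    List String × List String × List String
  | 0, _, t => t
  | f+1, cur, t =>
    match List.lookup cur profiles with
    | none => (t.1 ++ ["Missing profile " ++ cur], t.2.1, t.2.2)
    | some profile =>
      if t.2.1.contains cur then
        (t.1 ++ ["Profile requirement cycle detected: " ++
            PySem.Str.join " -> " (t.2.1 ++ [cur])], t.2.1, t.2.2)
      else if PySem.Set.contains t.2.2 cur then t
      else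
        let t2 := (pvChildren profile).foldl (fun s c => pvVisitP profiles f c s)
          (t.1, t.2.1 ++ [cur], t.2.2)
        (t2.1, t2.2.1.dropLast, PySem.Set.add t2.2.2 cur)

theorem pvVisitA_proj (profiles : List (String × List (String × List String))) :
    ∀ (f : Nat) (cur : String) (s : List String × List String × List String × List String),
      (pvVisitA profiles f cur s).2 = pvVisitP profiles f cur s.2 := by
  intro f
  induction f with
  | zero => intro cur s; rfl
  | succ f ih =>
    have hloop : ∀ (cs : List String) (s : List String × List String × List String × List String),
        (cs.foldl (fun s c =>
            let s' := pvVisitA profiles f c s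
            if ((List.lookup c profiles).isSome && !(s'.1.contains c))
            then (s'.1 ++ [c], s'.2) else s') s).2
          = cs.foldl (fun t c => pvVisitP profiles f c t) s.2 := by
      intro cs
      induction cs with
      | nil => intro s; rfl
      | cons c cs ihc =>
        intro s
        simp only [List.foldl_cons]
        rw [ihc]
        congr 1
        split
        · exact ih c s
        · exact ih c s
    intro cur s
    show (pvVisitA profiles (f+1) cur s).2 = pvVisitP profiles (f+1) cur s.2
    unfold pvVisitA pvVisitP
    cases hl : List.lookup cur profiles with
    | none => simp
    | some profile =>
      simp only
      split
      · rfl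
      · split
        · rfl
        · simp only
          rw [hloop]

theorem pvVisitP_visiting (profiles : List (String × List (String × List String))) :
    ∀ (f : Nat) (cur : String) (t : List String × List String × List String),
      (pvVisitP profiles f cur t).2.1 = t.2.1 := by
  intro f
  induction f with
  | zero => intro cur t; rfl
  | succ f ih =>
    have hloop : ∀ (cs : List String) (t : List String × List String × List String),
        ((cs.foldl (fun s c => pvVisitP profiles f c s) t)).2.1 = t.2.1 := by
      intro cs
      induction cs with
      | nil => intro t; rfl
      | cons c cs ihc => intro t; simp only [List.foldl_cons]; rw [ihc, ih]
    intro cur t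
    show (pvVisitP profiles (f+1) cur t).2.1 = t.2.1
    unfold pvVisitP
    cases hl : List.lookup cur profiles with
    | none => simp
    | some profile =>
      simp only
      split
      · rfl
      · split
        · rfl
        · simp only
          rw [hloop]
          simp

theorem pvLoopP_visiting (profiles : List (String × List (String × List String))) (f : Nat) :
    ∀ (cs : List String) (t : List String × List String × List String),
      ((cs.foldl (fun s c => pvVisitP profiles f c s) t)).2.1 = t.2.1 := by
  intro cs
  induction cs with
  | nil => intro t; rfl
  | cons c cs ihc =>
    intro t; simp only [List.foldl_cons]; rw [ihc, pvVisitP_visiting]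

def pvNotIn (profiles : List (String × List (String × List String))) (vs : List String) : Nat :=
  ((profiles.map Prod.fst).toFinset.filter (fun k => k ∉ vs)).card

def pvW (profiles : List (String × List (String × List String))) (x : String) : Nat :=
  1 + (pvChildrenOf profiles x).length

theorem pvRunB_nil (profiles : List (String × List (String × List String))) (fB : Nat)
    (st : List String × List String × List String) : pvRunB profiles fB [] st = st := by
  cases fB <;> rfl

theorem pvLookup_mem_keys (profiles : List (String × List (String × List String)))
    (c : String) (h : (List.lookup c profiles).isSome) : c ∈ profiles.map Prod.fst := by
  induction profiles with
  | nil => simp [List.lookup] at h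
  | cons p ps ihp =>
    rw [List.lookup] at h
    by_cases hc : c = p.1
    · simp [hc]
    · have hb : (c == p.1) = false := by simpa using hc
      rw [hb] at h
      simp only [List.map_cons, List.mem_cons]
      exact Or.inr (ihp h)

theorem pvLookup_mem (profiles : List (String × List (String × List String)))
    (a : String) (b : List (String × List String)) (h : List.lookup a profiles = some b) :
    (a, b) ∈ profiles := by
  induction profiles with
  | nil => simp [List.lookup] at h
  | cons p ps ihp =>
    rw [List.lookup] at h
    by_cases hc : a = p.1
    · have hb : (a == p.1) = true := by simpa using hc
      rw [hb] at h
      simp only [Option.some.injEq] at h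
      have : (a, b) = p := by rw [hc, ← h]
      rw [this]
      exact List.mem_cons_self
    · have hb : (a == p.1) = false := by simpa using hc
      rw [hb] at h
      exact List.mem_cons_of_mem _ (ihp h)

theorem pvNotIn_snoc_lt (profiles : List (String × List (String × List String)))
    (vs : List String) (c : String) (hc : (List.lookup c profiles).isSome) (hnc : c ∉ vs) :
    pvNotIn profiles (vs ++ [c]) < pvNotIn profiles vs := by
  unfold pvNotIn
  apply Finset.card_lt_card
  rw [Finset.ssubset_def]
  constructor
  · apply Finset.monotone_filter_right
    intro a ha
    simp only [List.mem_append, List.mem_singleton] at *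
    tauto
  · intro hsub
    have hcmem : c ∈ (profiles.map Prod.fst).toFinset.filter (fun k => k ∉ vs) := by
      simp [List.mem_toFinset, hnc, pvLookup_mem_keys profiles c hc]
    have := hsub hcmem
    simp at this

theorem pvSim (profiles : List (String × List (String × List String))) :
    ∀ (f : Nat) (node : String) (path rem failures visited : List String),
      pvNotIn profiles (path ++ [node]) + 1 ≤ f →
      ∃ (k : Nat) (D : List String),
        (rem.foldl (fun s c => pvVisitP profiles f c s) (failures, path ++ [node], visited)).2.2
          = visited ++ D ∧
        D.Nodup ∧
        (∀ x ∈ D, (List.lookup x profiles).isSome ∧ x ∉ visited ∧ x ∉ path ++ [node]) ∧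
        k ≤ rem.length + 1 + (D.map (pvW profiles)).sum ∧
        (∀ (fB : Nat) (rest : List (String × List String)),
          pvRunB profiles (fB + k) ((node, rem) :: rest) (failures, path ++ [node], visited)
            = pvRunB profiles fB rest
                ((rem.foldl (fun s c => pvVisitP profiles f c s) (failures, path ++ [node], visited)).1,
                 path,
                 PySem.Set.add
                   ((rem.foldl (fun s c => pvVisitP profiles f c s) (failures, path ++ [node], visited)).2.2)
                   node)) := by
  intro f
  induction f with
  | zero => intro node path rem failures visited hf; omega
  | succ f ih =>
    intro node path rem
    induction rem with
    | nil =>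
      intro failures visited hf
      refine ⟨1, [], by simp, List.nodup_nil, by simp, by simp, ?_⟩
      intro fB rest
      show pvRunB profiles (fB + 1) ((node, []) :: rest) (failures, path ++ [node], visited) = _
      rw [pvRunB]
      simp
    | cons c rem' ihr =>
      intro failures visited hf
      cases hl : List.lookup c profiles with
      | none =>
        have hv : pvVisitP profiles (f+1) c (failures, path ++ [node], visited)
            = (failures ++ ["Missing profile " ++ c], path ++ [node], visited) := by
          unfold pvVisitP; rw [hl]
        obtain ⟨k', D, h1, h2, h3, h4, h5⟩ := ihr (failures ++ ["Missing profile " ++ c]) visited hf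
        refine ⟨k' + 1, D, ?_, h2, h3, ?_, ?_⟩
        · simpa [List.foldl_cons, hv] using h1
        · simp only [List.length_cons]; omega
        · intro fB rest
          show pvRunB profiles ((fB + k') + 1) ((node, c :: rem') :: rest) (failures, path ++ [node], visited) = _
          rw [pvRunB]
          simp only [hl, Option.isNone_none, if_pos]
          rw [h5 fB rest]
          simp [List.foldl_cons, hv]
      | some profile =>
        by_cases hcp : c ∈ path ++ [node]
        · have hcb : ((path ++ [node]).contains c) = true := by simpa using hcp
          have hv : pvVisitP profiles (f+1) c (failures, path ++ [node], visited)
              = (failures ++ ["Profile requirement cycle detected: " ++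
                  PySem.Str.join " -> " ((path ++ [node]) ++ [c])], path ++ [node], visited) := by
            unfold pvVisitP; rw [hl]; simp only [hcb, if_true]
          obtain ⟨k', D, h1, h2, h3, h4, h5⟩ := ihr (failures ++ ["Profile requirement cycle detected: " ++
                  PySem.Str.join " -> " ((path ++ [node]) ++ [c])]) visited hf
          refine ⟨k' + 1, D, ?_, h2, h3, ?_, ?_⟩
          · simpa [List.foldl_cons, hv] using h1
          · simp only [List.length_cons]; omega
          · intro fB rest
            show pvRunB profiles ((fB + k') + 1) ((node, c :: rem') :: rest) (failures, path ++ [node], visited) = _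
            rw [pvRunB]
            simp only [hl, Option.isNone_some, Bool.false_eq_true, if_false, hcb, if_pos]
            rw [h5 fB rest]
            simp [List.foldl_cons, hv]
        · have hcb : ((path ++ [node]).contains c) = false := by simpa using hcp
          by_cases hcv : c ∈ visited
          · have hvb : (PySem.Set.contains visited c) = true := by
              simpa using hcv
            have hv : pvVisitP profiles (f+1) c (failures, path ++ [node], visited)
                = (failures, path ++ [node], visited) := by
              unfold pvVisitP; rw [hl]
              simp only [hcb, hvb, Bool.false_eq_true, if_false, if_true]
            obtain ⟨k', D, h1, h2, h3, h4, h5⟩ := ihr failures visited hf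
            refine ⟨k' + 1, D, ?_, h2, h3, ?_, ?_⟩
            · simpa [List.foldl_cons, hv] using h1
            · simp only [List.length_cons]; omega
            · intro fB rest
              show pvRunB profiles ((fB + k') + 1) ((node, c :: rem') :: rest) (failures, path ++ [node], visited) = _
              rw [pvRunB]
              simp only [hl, Option.isNone_some, Bool.false_eq_true, if_false, hcb, hvb, if_pos]
              rw [h5 fB rest]
              simp [List.foldl_cons, hv]
          · -- push case
            have hvb : (PySem.Set.contains visited c) = false := by
              simp; exact hcv
            have hiss : (List.lookup c profiles).isSome := by rw [hl]; rfl
            -- fuel for the child frame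
            have hf' : pvNotIn profiles ((path ++ [node]) ++ [c]) + 1 ≤ f := by
              have := pvNotIn_snoc_lt profiles (path ++ [node]) c hiss hcp
              omega
            obtain ⟨k1, D1, g1, g2, g3, g4, g5⟩ := ih c (path ++ [node]) (pvChildren profile) failures visited hf'
            -- value of the child fold
            have hcd1 : c ∉ D1 := fun hmem => ((g3 c hmem).2.2) (by simp)
            have hcvd1 : c ∉ visited ++ D1 := by
              simp only [List.mem_append]; rintro (h | h)
              · exact hcv h
              · exact hcd1 h
            have hadd : PySem.Set.add (visited ++ D1) c = (visited ++ D1) ++ [c] :=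
              PySem.Set.add_of_not_mem hcvd1
            have hvis : ((pvChildren profile).foldl (fun s c => pvVisitP profiles f c s)
                (failures, (path ++ [node]) ++ [c], visited)).2.1 = (path ++ [node]) ++ [c] :=
              pvLoopP_visiting profiles f _ _
            have hv : pvVisitP profiles (f+1) c (failures, path ++ [node], visited)
                = (((pvChildren profile).foldl (fun s c => pvVisitP profiles f c s)
                      (failures, (path ++ [node]) ++ [c], visited)).1,
                   path ++ [node], (visited ++ D1) ++ [c]) := by
              conv_lhs => unfold pvVisitP
              rw [hl]
              simp only [hcb, hvb, Bool.false_eq_true, if_false]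
              rw [g1, hvis, hadd]
              simp
            obtain ⟨k2, D2, q1, q2, q3, q4, q5⟩ := ihr (((pvChildren profile).foldl (fun s c => pvVisitP profiles f c s)
                      (failures, (path ++ [node]) ++ [c], visited)).1) ((visited ++ D1) ++ [c]) hf
            refine ⟨1 + k1 + k2, D1 ++ [c] ++ D2, ?_, ?_, ?_, ?_, ?_⟩
            · rw [List.foldl_cons, hv]
              rw [q1]
              simp [List.append_assoc]
            · -- Nodup
              refine List.Nodup.append (List.Nodup.append g2 (by simp) ?_) q2 ?_
              · intro a ha hb
                simp only [List.mem_singleton] at hb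
                exact hcd1 (hb ▸ ha)
              · intro a ha hb
                have hni := (q3 a hb).2.1
                simp only [List.mem_append, List.mem_singleton] at hni ha
                rcases ha with h | h
                · exact hni (Or.inl (Or.inr h))
                · exact hni (Or.inr h)
            · intro x hx
              simp only [List.mem_append, List.mem_singleton] at hx
              rcases hx with (hx | hx) | hx
              · obtain ⟨a1, a2, a3⟩ := g3 x hx
                exact ⟨a1, a2, fun hm => a3 (by simp only [List.mem_append] at hm ⊢; tauto)⟩
              · subst hx; exact ⟨hiss, hcv, hcp⟩
              · obtain ⟨a1, a2, a3⟩ := q3 x hx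
                refine ⟨a1, fun hm => a2 (by simp [hm]), a3⟩
            · -- fuel bound
              have hch : pvChildrenOf profiles c = pvChildren profile := by
                simp [pvChildrenOf, hl]
              have : (D1 ++ [c] ++ D2).map (pvW profiles) = D1.map (pvW profiles) ++ [pvW profiles c] ++ D2.map (pvW profiles) := by
                simp
              rw [this]
              simp only [List.sum_append, List.sum_cons, List.sum_nil, List.length_cons]
              have hwc : pvW profiles c = 1 + (pvChildren profile).length := by
                unfold pvW; rw [hch]
              omega
            · intro fB rest
              have harith : fB + (1 + k1 + k2) = (((fB + k2) + k1) + 1) := by omega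
              rw [harith]
              show pvRunB profiles (((fB + k2) + k1) + 1) ((node, c :: rem') :: rest) (failures, path ++ [node], visited) = _
              rw [pvRunB]
              simp only [hl, Option.isNone_some, Bool.false_eq_true, if_false, hcb, hvb]
              have hch : pvChildrenOf profiles c = pvChildren profile := by
                simp [pvChildrenOf, hl]
              rw [hch]
              rw [g5 (fB + k2) ((node, rem') :: rest)]
              rw [show ((pvChildren profile).foldl (fun s c => pvVisitP profiles f c s)
                    (failures, (path ++ [node]) ++ [c], visited)).2.2 = visited ++ D1 from g1]
              rw [hadd]
              rw [q5 fB rest]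
              rw [List.foldl_cons, hv]

theorem pvSortedSet_sortedSet (xs ys : List String) :
    pvSortedSet (pvSortedSet xs ++ ys) = pvSortedSet (xs ++ ys) := by
  unfold pvSortedSet
  apply PySem.List.sorted_eq_sorted_of_perm _ _ _ (fun a b h => h)
  apply (List.perm_ext_iff_of_nodup (PySem.Set.nodup_ofList _) (PySem.Set.nodup_ofList _)).mpr
  intro x
  simp [PySem.Set.mem_ofList, List.mem_append, PySem.List.mem_sorted]

theorem pvMainEq (profiles : List (String × List (String × List String)))
    (root : String) (profile : List (String × List String))
    (hl : List.lookup root profiles = some profile) :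
    (pvRunB profiles (pvFuelB profiles) [(root, pvChildren profile)] ([], [root], [])).1
      = (pvVisitA profiles (profiles.length + 1) root ([], [], [], [])).2.1 := by
  have hiss : (List.lookup root profiles).isSome := by rw [hl]; rfl
  have hm : root ∈ profiles.map Prod.fst := pvLookup_mem_keys profiles root hiss
  -- enough fuel for A's recursion
  have hf : pvNotIn profiles ([] ++ [root]) + 1 ≤ profiles.length := by
    have hlt : pvNotIn profiles ([] ++ [root]) < (profiles.map Prod.fst).toFinset.card := by
      unfold pvNotIn
      apply Finset.card_lt_card
      rw [Finset.ssubset_def]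
      refine ⟨Finset.filter_subset _ _, fun hsub => ?_⟩
      have := hsub (List.mem_toFinset.mpr hm)
      simp at this
    have hle : (profiles.map Prod.fst).toFinset.card ≤ profiles.length := by
      calc (profiles.map Prod.fst).toFinset.card ≤ (profiles.map Prod.fst).length :=
            List.toFinset_card_le _
        _ = profiles.length := by simp
    omega
  obtain ⟨k, D, g1, g2, g3, g4, g5⟩ :=
    pvSim profiles profiles.length root [] (pvChildren profile) [] [] hf
  simp only [List.nil_append] at g1 g3 g4 g5
  -- the B fuel is enough
  have hk : k ≤ pvFuelB profiles := by
    have hmax := PySem.List.le_foldl_max_nat profiles (fun p => (pvChildren p.2).length) 0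
    set M := profiles.foldl (fun a p => max a (pvChildren p.2).length) 0 with hM
    have hroot : (pvChildren profile).length ≤ M := by
      exact hmax.2 (root, profile) (pvLookup_mem profiles root profile hl)
    have hW : ∀ x ∈ D.map (pvW profiles), x ≤ M + 1 := by
      intro w hw
      obtain ⟨x, hx, rfl⟩ := List.mem_map.mp hw
      obtain ⟨h1', _, _⟩ := g3 x hx
      obtain ⟨v, hv⟩ := Option.isSome_iff_exists.mp h1'
      have : (pvChildren v).length ≤ M := hmax.2 (x, v) (pvLookup_mem profiles x v hv)
      unfold pvW pvChildrenOf
      rw [hv]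
      simp only [Option.getD_some]
      omega
    have hsum : (D.map (pvW profiles)).sum ≤ D.length * (M + 1) := by
      have := List.sum_le_card_nsmul (D.map (pvW profiles)) (M + 1) hW
      simpa [smul_eq_mul] using this
    have hDlen : D.length ≤ profiles.length := by
      have hcard : D.toFinset.card = D.length := List.toFinset_card_of_nodup g2
      have hsub : D.toFinset ⊆ (profiles.map Prod.fst).toFinset := by
        intro x hx
        exact List.mem_toFinset.mpr (pvLookup_mem_keys profiles x (g3 x (List.mem_toFinset.mp hx)).1)
      have := Finset.card_le_card hsub
      have h2 : (profiles.map Prod.fst).toFinset.card ≤ profiles.length := by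
        calc (profiles.map Prod.fst).toFinset.card ≤ (profiles.map Prod.fst).length :=
              List.toFinset_card_le _
          _ = profiles.length := by simp
      omega
    unfold pvFuelB
    rw [← hM]
    have := Nat.mul_le_mul hDlen (Nat.le_refl (M + 1))
    omega
  -- run the machine
  rw [show pvFuelB profiles = (pvFuelB profiles - k) + k from (Nat.sub_add_cancel hk).symm]
  rw [g5 (pvFuelB profiles - k) []]
  rw [pvRunB_nil]
  -- evaluate A's first visit step
  rw [pvVisitA_proj]
  conv_rhs => unfold pvVisitP
  rw [hl]
  norm_num


-- ===== VERDICT (by name: the statement is the Claim_ definition above) =====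
theorem evaluate_required_profile_failures_spec : Claim_equal_evaluate_required_profile_failures := by
  intro profile_id index _ _
  unfold Spec_evaluate_required_profile_failures
  unfold evaluate_required_profile_failures evaluate_required_profile_failures_alt pvResolveA
  cases hl : List.lookup profile_id ((List.lookup "profiles" index).getD []) with
  | none => simp [hl]
  | some profile =>
    simp only [hl]
    rw [pvMainEq _ _ _ hl]
    rw [PySem.List.foldl_append_if, PySem.List.foldl_append_if]
    rw [List.nil_append]
    exact pvSortedSet_sortedSet _ _
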